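-- pv_equiv track=rewrite | github.com/chuleeshen/bias-pipeline | background.py | topic_combo
-- ===== SOURCE A (Python) =====
-- def topic_combo(input_dict):
--   combined = []
--   for key in input_dict:
--     for value in input_dict[key]:
--       cleaned = value.replace('bias', '').strip()
--       combined.append(cleaned)
--
--   output = list(set(combined))
--   output.sort()
--
--   return output
-- ===== SOURCE B (Python) =====
-- def _merge(xs, ys):
--   out = []
--   i = j = 0
--   while i < len(xs) and j < len(ys):
--     if xs[i] < ys[j]:
--       out.append(xs[i]); i += 1
--     elif ys[j] < xs[i]:
--       out.append(ys[j]); j += 1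
--     else:
--       out.append(xs[i]); i += 1; j += 1
--   return out + xs[i:] + ys[j:]
--
-- def _msort(l):
--   if len(l) < 2:
--     return l
--   h = len(l) // 2
--   return _merge(_msort(l[:h]), _msort(l[h:]))
--
-- def topic_combo(input_dict):
--   combined = [v.replace('bias', '').strip() for vs in input_dict.values() for v in vs]
--   return _msort(combined)
-- ===== Notes on version B (the rewrite author's own statement) =====
-- stated objective: alternative
-- what changed: B never builds a set and never calls the built-in sort: it flattens the cleaned values and then sorts them with a hand-written recursive merge sort whose merge step drops duplicates as it encounters them, whereas A collects everything, deduplicates via set() and sorts at the end.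
import Mathlib
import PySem

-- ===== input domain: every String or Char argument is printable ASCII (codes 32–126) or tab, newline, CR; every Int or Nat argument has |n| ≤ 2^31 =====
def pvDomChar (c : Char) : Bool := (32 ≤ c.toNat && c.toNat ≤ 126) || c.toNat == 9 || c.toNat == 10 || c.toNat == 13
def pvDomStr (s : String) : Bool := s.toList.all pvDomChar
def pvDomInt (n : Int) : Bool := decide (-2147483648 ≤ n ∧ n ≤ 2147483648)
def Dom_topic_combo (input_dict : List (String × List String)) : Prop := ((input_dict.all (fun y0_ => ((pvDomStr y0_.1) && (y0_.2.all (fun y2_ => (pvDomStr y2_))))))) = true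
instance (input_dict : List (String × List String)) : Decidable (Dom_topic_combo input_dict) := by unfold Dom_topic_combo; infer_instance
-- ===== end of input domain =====

-- B sorts the flattened cleaned values with a hand-written merge sort whose merge drops
-- duplicates, instead of A's set-based dedup followed by the built-in sort (alternative
-- algorithm, same result).

-- ===== PORT A =====
def topic_combo (input_dict : List (String × List String)) : List String :=
  let d := PySem.Dict.ofList input_dict
  let combined := d.keys.foldl (fun acc k =>
    (d.getD k []).foldl (fun acc v =>
      acc ++ [PySem.Str.strip (PySem.Str.replace v "bias" "")]) acc) []
  PySem.List.sorted (PySem.Set.ofList combined) (fun x => x) false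

-- ===== PORT B =====
-- Source B's two-pointer merge loop, as the structural recursion on the two remaining suffixes
def pvMerge : List String → List String → List String
  | [], ys => ys
  | x :: xs, [] => x :: xs
  | x :: xs, y :: ys =>
    if x < y then x :: pvMerge xs (y :: ys)
    else if y < x then y :: pvMerge (x :: xs) ys
    else x :: pvMerge xs ys
termination_by xs ys => xs.length + ys.length

def pvMsort : List String → List String
  | [] => []
  | [x] => [x]
  | x :: y :: t =>
    pvMerge (pvMsort ((x :: y :: t).take ((x :: y :: t).length / 2)))
            (pvMsort ((x :: y :: t).drop ((x :: y :: t).length / 2)))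
termination_by l => l.length
decreasing_by
  · simp; omega
  · simp; omega

def topic_combo_alt (input_dict : List (String × List String)) : List String :=
  pvMsort (((PySem.Dict.ofList input_dict).values.flatMap (fun vs => vs)).map
    (fun v => PySem.Str.strip (PySem.Str.replace v "bias" "")))

-- ===== PRECONDITION & SPEC =====
def Spec_topic_combo (input_dict : List (String × List String)) (out : List String) : Prop := out = topic_combo_alt input_dict
instance (input_dict : List (String × List String)) (out : List String) : Decidable (Spec_topic_combo input_dict out) := by unfold Spec_topic_combo; infer_instance

-- ===== CLAIM (what is proved, stated in full; the proofs are below) =====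
def Claim_equal_topic_combo : Prop := ∀ (input_dict : List (String × List String)), Dom_topic_combo input_dict → Spec_topic_combo input_dict (topic_combo input_dict)

-- ===== LEMMAS AND PROOFS =====

-- membership in a deduplicating merge
lemma pvMerge_mem : ∀ (xs ys : List String) (z : String),
    z ∈ pvMerge xs ys ↔ z ∈ xs ∨ z ∈ ys
  | [], ys, z => by simp [pvMerge]
  | x :: xs, [], z => by simp [pvMerge]
  | x :: xs, y :: ys, z => by
    rw [pvMerge]
    split_ifs with h1 h2
    · rw [List.mem_cons, pvMerge_mem xs (y :: ys) z]; simp; tauto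
    · rw [List.mem_cons, pvMerge_mem (x :: xs) ys z]; simp; tauto
    · have hxy : x = y := le_antisymm (not_lt.mp h2) (not_lt.mp h1)
      rw [List.mem_cons, pvMerge_mem xs ys z]; subst hxy; simp; tauto
termination_by xs ys => xs.length + ys.length

-- a deduplicating merge of two strictly sorted lists is strictly sorted
lemma pvMerge_pairwise : ∀ (xs ys : List String),
    xs.Pairwise (· < ·) → ys.Pairwise (· < ·) → (pvMerge xs ys).Pairwise (· < ·)
  | [], ys, _, hy => by simpa [pvMerge] using hy
  | x :: xs, [], hx, _ => by simpa [pvMerge] using hx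
  | x :: xs, y :: ys, hx, hy => by
    rcases List.pairwise_cons.mp hx with ⟨hxall, hxs⟩
    rcases List.pairwise_cons.mp hy with ⟨hyall, hys⟩
    rw [pvMerge]
    split_ifs with h1 h2
    · rw [List.pairwise_cons]
      refine ⟨fun z hz => ?_, pvMerge_pairwise xs (y :: ys) hxs hy⟩
      rcases (pvMerge_mem xs (y :: ys) z).mp hz with h | h
      · exact hxall z h
      · rcases List.mem_cons.mp h with rfl | h
        · exact h1
        · exact lt_trans h1 (hyall z h)
    · rw [List.pairwise_cons]
      refine ⟨fun z hz => ?_, pvMerge_pairwise (x :: xs) ys hx hys⟩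
      rcases (pvMerge_mem (x :: xs) ys z).mp hz with h | h
      · rcases List.mem_cons.mp h with rfl | h
        · exact h2
        · exact lt_trans h2 (hxall z h)
      · exact hyall z h
    · have hxy : x = y := le_antisymm (not_lt.mp h2) (not_lt.mp h1)
      rw [List.pairwise_cons]
      refine ⟨fun z hz => ?_, pvMerge_pairwise xs ys hxs hys⟩
      rcases (pvMerge_mem xs ys z).mp hz with h | h
      · exact hxall z h
      · exact hxy ▸ hyall z h
termination_by xs ys => xs.length + ys.length

-- merge sort keeps exactly the members of its input
lemma pvMsort_mem : ∀ (l : List String) (z : String), z ∈ pvMsort l ↔ z ∈ l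
  | [], z => by simp [pvMsort]
  | [x], z => by simp [pvMsort]
  | x :: y :: t, z => by
    rw [pvMsort, pvMerge_mem,
      pvMsort_mem ((x :: y :: t).take ((x :: y :: t).length / 2)) z,
      pvMsort_mem ((x :: y :: t).drop ((x :: y :: t).length / 2)) z,
      ← List.mem_append, List.take_append_drop]
termination_by l => l.length
decreasing_by
  · simp; omega
  · simp; omega

-- merge sort's output is strictly sorted (duplicates vanish in the merges)
lemma pvMsort_pairwise : ∀ (l : List String), (pvMsort l).Pairwise (· < ·)
  | [] => by simp [pvMsort]
  | [x] => by simp [pvMsort]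
  | x :: y :: t => by
    rw [pvMsort]
    exact pvMerge_pairwise _ _
      (pvMsort_pairwise ((x :: y :: t).take ((x :: y :: t).length / 2)))
      (pvMsort_pairwise ((x :: y :: t).drop ((x :: y :: t).length / 2)))
termination_by l => l.length
decreasing_by
  · simp; omega
  · simp; omega

-- two strictly increasing string lists with the same members are equal
lemma eq_of_mem_pairwise_lt (a b : List String)
    (ha : a.Pairwise (· < ·)) (hb : b.Pairwise (· < ·))
    (h : ∀ z, z ∈ a ↔ z ∈ b) : a = b := by
  have hna : a.Nodup := ha.imp ne_of_lt
  have hnb : b.Nodup := hb.imp ne_of_lt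
  have hperm : a.Perm b := (List.perm_ext_iff_of_nodup hna hnb).mpr h
  exact PySem.List.eq_of_perm_of_pairwise_le_of_injective (fun x => x)
    Function.injective_id hperm (ha.imp le_of_lt) (hb.imp le_of_lt)

-- A's keys/getD flatten equals B's flatMap-over-values of cleaned items
lemma combined_eq (input_dict : List (String × List String)) :
    (PySem.Dict.ofList input_dict).keys.foldl (fun acc k =>
      ((PySem.Dict.ofList input_dict).getD k []).foldl (fun acc v =>
        acc ++ [PySem.Str.strip (PySem.Str.replace v "bias" "")]) acc) []
    = ((PySem.Dict.ofList input_dict).values.flatMap (fun vs => vs)).map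
        (fun v => PySem.Str.strip (PySem.Str.replace v "bias" "")) := by
  have hv : (PySem.Dict.ofList input_dict).values
      = (PySem.Dict.ofList input_dict).keys.map (fun k => (PySem.Dict.ofList input_dict).getD k []) :=
    PySem.Dict.values_eq_map_keys _ (PySem.Dict.nodup_keys_ofList input_dict) []
  rw [hv]
  simp only [PySem.List.foldl_append_singleton_eq_map, List.nil_append,
    PySem.List.foldl_append_eq_flatMap, List.flatMap_map, List.map_flatMap]

-- ===== VERDICT (by name: the statement is the Claim_ definition above) =====
theorem topic_combo_spec : Claim_equal_topic_combo := by
  intro input_dict _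
  unfold Spec_topic_combo topic_combo topic_combo_alt
  simp only []
  rw [combined_eq]
  refine eq_of_mem_pairwise_lt _ _
    (PySem.List.sorted_ofList_pairwise_lt _) (pvMsort_pairwise _) (fun z => ?_)
  rw [pvMsort_mem]
  simp [PySem.List.mem_sorted, PySem.Set.mem_ofList]
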